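-- pv_equiv track=rewrite | github.com/jihyuk0414/BackJoonPrac | 프로그래머스/1/134240. 푸드 파이트 대회/푸드 파이트 대회.py | solution
-- ===== SOURCE A (Python) =====
-- def solution(food):
--     answer = ''
--     onepeoplefood = []
--     for i in range(len(food)):
--         if food[i]%2 != 0 :
--             for j in range(1,food[i]//2+1) :
--                 onepeoplefood.append(str(i))
--         else:
--             #잘 나눠질때
--             for j in range(1,food[i]//2+1) :
--                 onepeoplefood.append(str(i))
--
--     answer = ''.join(onepeoplefood) +'0' + ''.join(sorted(onepeoplefood,reverse=True))
--
--     return answer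
-- ===== SOURCE B (Python) =====
-- def solution(food):
--     n = len(food)
--     out = [''.join(str(i) * (food[i] // 2) for i in range(n)), '0']
--
--     def dfs(x):
--         # visit the decimal trie below x in descending lexicographic order
--         for c in range(9, -1, -1):
--             y = 10 * x + c
--             if y < n:
--                 dfs(y)
--         out.append(str(x) * (food[x] // 2))
--
--     for d in range(9, 0, -1):
--         if d < n:
--             dfs(d)
--     if n > 0:
--         out.append(str(0) * (food[0] // 2))
--     return ''.join(out)
-- ===== Notes on version B (the rewrite author's own statement) =====
-- stated objective: faster
-- what changed: A expands every food count into a list of digit strings and sorts that whole multiset for the second half; B never sorts: it emits the second half by a recursive depth-first traversal of the decimal trie of the indices (children 9..0 before their root, digits 9..1 then 0 at the top), which visits the indices in descending lexicographic order directly, and writes each index's repeated digits once.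
import Mathlib
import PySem

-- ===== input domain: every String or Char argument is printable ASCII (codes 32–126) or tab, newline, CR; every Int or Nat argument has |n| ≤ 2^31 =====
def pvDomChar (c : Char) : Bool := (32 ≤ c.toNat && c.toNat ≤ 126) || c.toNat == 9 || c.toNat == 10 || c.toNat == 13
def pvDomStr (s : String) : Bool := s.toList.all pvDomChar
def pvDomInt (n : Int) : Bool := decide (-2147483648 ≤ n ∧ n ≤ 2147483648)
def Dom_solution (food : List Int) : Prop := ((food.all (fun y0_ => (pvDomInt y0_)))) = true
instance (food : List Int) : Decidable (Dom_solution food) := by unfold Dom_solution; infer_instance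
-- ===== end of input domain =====

-- B replaces A's expand-then-sort second half by a depth-first traversal of the decimal trie of
-- the indices, emitting blocks in descending lexicographic order with no sorting at all (measured faster).


-- ===== PORT A =====
def solution (food : List Int) : String :=
  let onepeoplefood : List String :=
    (PySem.List.pyRange 0 (food.length : Int) 1).foldl (fun acc i =>
      if PySem.Int.mod (PySem.List.pyGetD food i 0) 2 ≠ 0 then
        (PySem.List.pyRange 1 (PySem.Int.floordiv (PySem.List.pyGetD food i 0) 2 + 1) 1).foldl
          (fun acc2 _ => acc2 ++ [PySem.Int.toStr i]) acc
      else
        (PySem.List.pyRange 1 (PySem.Int.floordiv (PySem.List.pyGetD food i 0) 2 + 1) 1).foldl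
          (fun acc2 _ => acc2 ++ [PySem.Int.toStr i]) acc) []
  PySem.Str.join "" onepeoplefood ++ "0" ++
    PySem.Str.join "" (PySem.List.sorted onepeoplefood (fun x => x) true)

-- ===== PORT B =====
-- str(s) * n  (Python string repetition; empty for n ≤ 0) — exact via PySem.List.pyRepeat
def pyStrMul (s : String) (n : Int) : String :=
  String.ofList (PySem.List.pyRepeat s.toList n)

-- Source B's recursive dfs: the inner 'for c in range(9,-1,-1)' loop is the foldl, the recursion is
-- made structural with a fuel argument (n.toNat is always enough: the depth is the digit count)
def pvDfsB (food : List Int) (n : Int) : Nat → Int → List String → List String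
  | 0, _, out => out
  | fuel+1, x, out =>
      ((PySem.List.pyRange 9 (-1) (-1)).foldl
        (fun out c => if 10*x + c < n then pvDfsB food n fuel (10*x + c) out else out) out)
      ++ [pyStrMul (PySem.Int.toStr x) (PySem.Int.floordiv (PySem.List.pyGetD food x 0) 2)]

def solution_alt (food : List Int) : String :=
  let n : Int := food.length
  let first := PySem.Str.join "" ((PySem.List.pyRange 0 n 1).map
    (fun i => pyStrMul (PySem.Int.toStr i) (PySem.Int.floordiv (PySem.List.pyGetD food i 0) 2)))
  let out := [first, "0"]
  let out := (PySem.List.pyRange 9 0 (-1)).foldl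
    (fun out d => if d < n then pvDfsB food n n.toNat d out else out) out
  let out := if 0 < n then
      out ++ [pyStrMul (PySem.Int.toStr 0) (PySem.Int.floordiv (PySem.List.pyGetD food 0 0) 2)]
    else out
  PySem.Str.join "" out

-- ===== PRECONDITION & SPEC =====
def Spec_solution (food : List Int) (out : String) : Prop := out = solution_alt food
instance (food : List Int) (out : String) : Decidable (Spec_solution food out) := by unfold Spec_solution; infer_instance

-- ===== CLAIM (what is proved, stated in full; the proofs are below) =====
def Claim_equal_solution : Prop := ∀ (food : List Int), Dom_solution food → Spec_solution food (solution food)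

-- ===== LEMMAS AND PROOFS =====

-- the per-index block of repeated digit strings, and the per-index repeated string
def pvBlock (food : List Int) (i : Int) : List String :=
  List.replicate (PySem.Int.floordiv (PySem.List.pyGetD food i 0) 2).toNat (PySem.Int.toStr i)

def pvPiece (food : List Int) (i : Int) : String :=
  pyStrMul (PySem.Int.toStr i) (PySem.Int.floordiv (PySem.List.pyGetD food i 0) 2)

-- m lies in the decimal-trie subtree rooted at x
def pvT (x m : Int) : Prop := ∃ k : Nat, x * 10^k ≤ m ∧ m < (x+1) * 10^k

-- spec of pvDfsB's index traversal: children with digits c-1, c-2, …, 0 (each subtree followed by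
-- its root), for the subtree of x cut off at n
def pvIdxC (n x : Int) (c : Nat) : List Int :=
  match c with
  | 0 => []
  | c+1 =>
      (if 1 ≤ x ∧ 10*x + (c:Int) < n then pvIdxC n (10*x + (c:Int)) 10 ++ [10*x + (c:Int)] else [])
      ++ pvIdxC n x c
termination_by ((n - x).toNat, c)
decreasing_by
  · exact Prod.Lex.left _ _ (by omega)
  · exact Prod.Lex.right _ (by omega)

-- the full second-half index order: digits 9,…,1 then 0
def pvTopC (n : Int) : Nat → List Int
  | 0 => []
  | d+1 => (if ((d:Int)+1) < n then pvIdxC n ((d:Int)+1) 10 ++ [(d:Int)+1] else []) ++ pvTopC n d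

def pvK (n : Int) : List Int := pvTopC n 9 ++ (if 0 < n then [0] else [])

-- ---- A-side: the expanded list as a flatMap of blocks ----

theorem pvInner (food : List Int) (i : Int) (acc : List String) :
    (PySem.List.pyRange 1 (PySem.Int.floordiv (PySem.List.pyGetD food i 0) 2 + 1) 1).foldl
      (fun acc2 _ => acc2 ++ [PySem.Int.toStr i]) acc = acc ++ pvBlock food i := by
  have h1 : (PySem.Int.floordiv (PySem.List.pyGetD food i 0) 2 + 1 - 1 : Int)
      = PySem.Int.floordiv (PySem.List.pyGetD food i 0) 2 := by ring
  rw [PySem.List.foldl_append_singleton_eq_map (f := fun _ => PySem.Int.toStr i),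
    List.map_const', PySem.List.length_pyRange_one, h1, pvBlock]

theorem pvAList (food : List Int) (K : List Int) (acc : List String) :
    K.foldl (fun acc i =>
      if PySem.Int.mod (PySem.List.pyGetD food i 0) 2 ≠ 0 then
        (PySem.List.pyRange 1 (PySem.Int.floordiv (PySem.List.pyGetD food i 0) 2 + 1) 1).foldl
          (fun acc2 _ => acc2 ++ [PySem.Int.toStr i]) acc
      else
        (PySem.List.pyRange 1 (PySem.Int.floordiv (PySem.List.pyGetD food i 0) 2 + 1) 1).foldl
          (fun acc2 _ => acc2 ++ [PySem.Int.toStr i]) acc) acc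
    = acc ++ K.flatMap (pvBlock food) := by
  have hstep : (fun (acc : List String) (i : Int) =>
      if PySem.Int.mod (PySem.List.pyGetD food i 0) 2 ≠ 0 then
        (PySem.List.pyRange 1 (PySem.Int.floordiv (PySem.List.pyGetD food i 0) 2 + 1) 1).foldl
          (fun acc2 _ => acc2 ++ [PySem.Int.toStr i]) acc
      else
        (PySem.List.pyRange 1 (PySem.Int.floordiv (PySem.List.pyGetD food i 0) 2 + 1) 1).foldl
          (fun acc2 _ => acc2 ++ [PySem.Int.toStr i]) acc)
      = fun (acc : List String) (i : Int) => acc ++ pvBlock food i := by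
    funext acc i
    rw [ite_self, pvInner]
  rw [hstep, PySem.List.foldl_append_eq_flatMap]

theorem pvJoinNil (ps : List (List Char)) : PySem.Chars.join [] ps = ps.flatten := by
  induction ps with
  | nil => rfl
  | cons h t ih =>
      cases t with
      | nil => simp [PySem.Chars.join, List.intercalate]
      | cons h2 t2 =>
          simp only [PySem.Chars.join, List.intercalate] at *
          simp_all [List.intersperse]

-- joining the expanded blocks = joining the per-index repeated strings
theorem pvJoinBlocks (food : List Int) (K : List Int) :
    PySem.Str.join "" (K.flatMap (pvBlock food)) =
    PySem.Str.join "" (K.map (pvPiece food)) := by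
  have h : ∀ s t : String, s.toList = t.toList → s = t := fun s t hh => by
    rw [← String.ofList_toList (s := s), ← String.ofList_toList (s := t), hh]
  apply h
  rw [PySem.Str.toList_join, PySem.Str.toList_join, String.toList_empty, pvJoinNil, pvJoinNil]
  induction K with
  | nil => rfl
  | cons k t ih =>
      simp only [List.flatMap_cons, List.map_cons, List.map_append, List.flatten_append,
        List.flatten_cons, ih, pvBlock, pvPiece, pyStrMul, PySem.List.pyRepeat,
        List.map_replicate, String.toList_ofList]

theorem pvFlatMapPairwise (food : List Int) (K : List Int)
    (h : K.Pairwise (fun a b => PySem.Int.toStr b ≤ PySem.Int.toStr a)) :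
    (K.flatMap (pvBlock food)).Pairwise (fun a b : String => b ≤ a) := by
  induction K with
  | nil => simp
  | cons k t ih =>
      rcases List.pairwise_cons.mp h with ⟨hk, ht⟩
      simp only [List.flatMap_cons]
      rw [List.pairwise_append]
      refine ⟨?_, ih ht, ?_⟩
      · exact List.pairwise_replicate.mpr (Or.inr le_rfl)
      · intro a ha b hb
        rcases List.eq_of_mem_replicate ha with rfl
        rcases List.mem_flatMap.mp hb with ⟨j, hj, hbj⟩
        rcases List.eq_of_mem_replicate hbj with rfl
        exact hk j hj

-- ---- trie arithmetic ----

theorem pvT_self (x : Int) : pvT x x := ⟨0, by simp, by simp⟩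

theorem pvT_le {x m : Int} (hx : 1 ≤ x) (h : pvT x m) : x ≤ m := by
  rcases h with ⟨k, h1, _⟩
  calc x = x * 1 := by ring
    _ ≤ x * 10^k := by
        apply mul_le_mul_of_nonneg_left _ (by omega)
        exact one_le_pow₀ (by norm_num)
    _ ≤ m := h1

theorem pvT_step {x c m : Int} (hc : 0 ≤ c) (hc9 : c ≤ 9) (h : pvT (10*x + c) m) : pvT x m := by
  rcases h with ⟨k, h1, h2⟩
  refine ⟨k+1, ?_, ?_⟩
  · calc x * 10^(k+1) = (10*x) * 10^k := by ring
      _ ≤ (10*x + c) * 10^k := by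
          apply mul_le_mul_of_nonneg_right (by omega) (by positivity)
      _ ≤ m := h1
  · calc m < (10*x + c + 1) * 10^k := h2
      _ ≤ ((x+1) * 10) * 10^k := by
          apply mul_le_mul_of_nonneg_right (by omega) (by positivity)
      _ = (x+1) * 10^(k+1) := by ring

-- splitting one scale: a member of x's interval at scale k+1 other than nothing lies in a child's
-- interval at scale k
theorem pvT_split_k {x m : Int} (k : Nat)
    (h1 : x * 10^(k+1) ≤ m) (h2 : m < (x+1) * 10^(k+1)) :
    ∃ c : Int, 0 ≤ c ∧ c ≤ 9 ∧ (10*x + c) * 10^k ≤ m ∧ m < (10*x + c + 1) * 10^k := by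
  have hp : (0:Int) < 10^k := by positivity
  set q : Int := m / 10^k with hq
  have hdiv : q * 10^k ≤ m := by
    have := Int.le_ediv_iff_mul_le (a := q) (b := m) hp
    exact this.mp le_rfl
  have hdiv2 : m < (q + 1) * 10^k := by
    have := Int.ediv_lt_iff_lt_mul (a := m) (b := q + 1) hp
    exact this.mp (by omega)
  have hlow : 10*x ≤ q := by
    rw [hq, Int.le_ediv_iff_mul_le hp]
    calc (10*x) * 10^k = x * 10^(k+1) := by ring
      _ ≤ m := h1
  have hhigh : q < 10*x + 10 := by
    rw [hq, Int.ediv_lt_iff_lt_mul hp]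
    calc m < (x+1) * 10^(k+1) := h2
      _ = (10*x + 10) * 10^k := by ring
  exact ⟨q - 10*x, by omega, by omega, by rw [show 10*x + (q - 10*x) = q by ring]; exact hdiv,
    by rw [show 10*x + (q - 10*x) + 1 = q + 1 by ring]; exact hdiv2⟩

theorem pvT_split {x m : Int} (hx : 1 ≤ x) (h : pvT x m) (hne : m ≠ x) :
    ∃ c : Int, 0 ≤ c ∧ c ≤ 9 ∧ pvT (10*x + c) m := by
  rcases h with ⟨k, h1, h2⟩
  cases k with
  | zero => simp at h1 h2; omega
  | succ j =>
      rcases pvT_split_k j h1 h2 with ⟨c, hc0, hc9, ha, hb⟩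
      exact ⟨c, hc0, hc9, ⟨j, ha, hb⟩⟩

-- every 1 ≤ m has a leading digit
theorem pvT_leading {m : Int} (hm : 1 ≤ m) : ∃ d : Int, 1 ≤ d ∧ d ≤ 9 ∧ pvT d m := by
  have hm0 : m.toNat ≠ 0 := by omega
  set K := Nat.log 10 m.toNat with hK
  have h1 : (10:Nat)^K ≤ m.toNat := Nat.pow_log_le_self 10 hm0
  have h2 : m.toNat < 10^(K+1) := Nat.lt_pow_succ_log_self (by norm_num) m.toNat
  have h1' : (10:Int)^K ≤ m := by
    calc (10:Int)^K = ((10^K : Nat) : Int) := by push_cast; ring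
      _ ≤ (m.toNat : Int) := by exact_mod_cast h1
      _ = m := by omega
  have h2' : m < (10:Int)^(K+1) := by
    calc m = (m.toNat : Int) := by omega
      _ < ((10^(K+1) : Nat) : Int) := by exact_mod_cast h2
      _ = (10:Int)^(K+1) := by push_cast; ring
  have hp : (0:Int) < 10^K := by positivity
  have hd1 : 1 ≤ m / 10^K := by
    rw [Int.le_ediv_iff_mul_le hp]
    linarith
  have hd9 : m / 10^K < 10 := by
    rw [Int.ediv_lt_iff_lt_mul hp]
    calc m < (10:Int)^(K+1) := h2'
      _ = 10 * 10^K := by ring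
  refine ⟨m / 10^K, hd1, by omega, ⟨K, ?_, ?_⟩⟩
  · exact (Int.le_ediv_iff_mul_le hp).mp le_rfl
  · exact (Int.ediv_lt_iff_lt_mul hp).mp (by omega)

-- ---- membership / nodup / pairwise of the traversal, by fuel induction ----

theorem pvMemSub (n : Int) : ∀ (fuel : Nat) (x : Int), (n - x).toNat ≤ fuel → 1 ≤ x → x < n →
    ∀ m, (m ∈ pvIdxC n x 10 ∨ m = x) ↔ (pvT x m ∧ m < n) := by
  intro fuel
  induction fuel with
  | zero => intro x hf hx hxn m; omega
  | succ fuel ih =>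
      intro x hf hx hxn m
      have Hchild : ∀ d : Int, 0 ≤ d → d ≤ 9 → 10*x + d < n →
          ∀ m', (m' ∈ pvIdxC n (10*x+d) 10 ∨ m' = 10*x+d) ↔ (pvT (10*x+d) m' ∧ m' < n) := by
        intro d hd0 hd9 hdn m'
        exact ih (10*x+d) (by omega) (by omega) hdn m'
      have hloop : ∀ c : Nat, c ≤ 10 → ∀ m',
          (m' ∈ pvIdxC n x c ↔
            ∃ d : Int, 0 ≤ d ∧ d < (c:Int) ∧ 10*x+d < n ∧ pvT (10*x+d) m' ∧ m' < n) := by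
        intro c
        induction c with
        | zero =>
            intro _ m'
            simp only [pvIdxC, List.not_mem_nil, false_iff]
            rintro ⟨d, hd0, hdc, -⟩
            simp only [Nat.cast_zero] at hdc
            omega
        | succ c ihc =>
            intro hc m'
            rw [show pvIdxC n x (c+1) =
              (if 1 ≤ x ∧ 10*x + (c:Int) < n then
                pvIdxC n (10*x + (c:Int)) 10 ++ [10*x + (c:Int)] else []) ++ pvIdxC n x c
              from by rw [pvIdxC]]
            rw [List.mem_append, ihc (by omega)]
            by_cases hg : 10*x + (c:Int) < n
            · rw [if_pos ⟨hx, hg⟩]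
              constructor
              · rintro (hmem | ⟨d, hd0, hdc, hdn, hT, hmn⟩)
                · rcases List.mem_append.mp hmem with h1 | h1
                  · have := (Hchild (c:Int) (by positivity) (by exact_mod_cast (by omega : c ≤ 9)) hg m').mp (Or.inl h1)
                    exact ⟨(c:Int), by positivity, by push_cast; omega, hg, this.1, this.2⟩
                  · have hm' : m' = 10*x + (c:Int) := by simpa using h1
                    have := (Hchild (c:Int) (by positivity) (by exact_mod_cast (by omega : c ≤ 9)) hg m').mp (Or.inr hm')
                    exact ⟨(c:Int), by positivity, by push_cast; omega, hg, this.1, this.2⟩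
                · exact ⟨d, hd0, by push_cast; omega, hdn, hT, hmn⟩
              · rintro ⟨d, hd0, hdc, hdn, hT, hmn⟩
                by_cases hdceq : d = (c:Int)
                · subst hdceq
                  have := (Hchild (c:Int) hd0 (by omega) hdn m').mpr ⟨hT, hmn⟩
                  rcases this with h1 | h1
                  · exact Or.inl (List.mem_append.mpr (Or.inl h1))
                  · exact Or.inl (List.mem_append.mpr (Or.inr (List.mem_singleton.mpr h1)))
                · right
                  refine ⟨d, hd0, ?_, hdn, hT, hmn⟩
                  push_cast at hdc ⊢
                  omega
            · rw [if_neg (by rintro ⟨-, h⟩; exact hg h)]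
              simp only [List.not_mem_nil, false_or]
              constructor
              · rintro ⟨d, hd0, hdc, hdn, hT, hmn⟩
                exact ⟨d, hd0, by push_cast; omega, hdn, hT, hmn⟩
              · rintro ⟨d, hd0, hdc, hdn, hT, hmn⟩
                refine ⟨d, hd0, ?_, hdn, hT, hmn⟩
                by_cases hdceq : d = (c:Int)
                · subst hdceq; exact absurd hdn hg
                · push_cast at hdc ⊢; omega
      constructor
      · rintro (hmem | rfl)
        · rcases (hloop 10 le_rfl m).mp hmem with ⟨d, hd0, hd10, hdn, hT, hmn⟩
          exact ⟨pvT_step hd0 (by omega) hT, hmn⟩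
        · exact ⟨pvT_self m, hxn⟩
      · rintro ⟨hT, hmn⟩
        by_cases hmx : m = x
        · exact Or.inr hmx
        · left
          rcases pvT_split hx hT hmx with ⟨c, hc0, hc9, hTc⟩
          have hc_n : 10*x + c < n := lt_of_le_of_lt (pvT_le (by omega) hTc) hmn
          exact (hloop 10 le_rfl m).mpr ⟨c, hc0, by omega, hc_n, hTc, hmn⟩

-- standalone membership for a partial digit count (children resolved through pvMemSub)
theorem pvMemC (n x : Int) (hx : 1 ≤ x) : ∀ (c : Nat), c ≤ 10 → ∀ m,
    (m ∈ pvIdxC n x c ↔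
      ∃ d : Int, 0 ≤ d ∧ d < (c:Int) ∧ 10*x+d < n ∧ pvT (10*x+d) m ∧ m < n) := by
  intro c
  induction c with
  | zero =>
      intro _ m
      simp only [pvIdxC, List.not_mem_nil, false_iff]
      rintro ⟨d, hd0, hdc, -⟩
      simp only [Nat.cast_zero] at hdc
      omega
  | succ c ihc =>
      intro hc m
      rw [show pvIdxC n x (c+1) =
        (if 1 ≤ x ∧ 10*x + (c:Int) < n then
          pvIdxC n (10*x + (c:Int)) 10 ++ [10*x + (c:Int)] else []) ++ pvIdxC n x c
        from by rw [pvIdxC]]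
      rw [List.mem_append, ihc (by omega)]
      have Hchild : ∀ d : Int, 0 ≤ d → d ≤ 9 → 10*x + d < n →
          ∀ m', (m' ∈ pvIdxC n (10*x+d) 10 ∨ m' = 10*x+d) ↔ (pvT (10*x+d) m' ∧ m' < n) :=
        fun d hd0 hd9 hdn m' => pvMemSub n (n - (10*x+d)).toNat (10*x+d) le_rfl (by omega) hdn m'
      by_cases hg : 10*x + (c:Int) < n
      · rw [if_pos ⟨hx, hg⟩]
        constructor
        · rintro (hmem | ⟨d, hd0, hdc, hdn, hT, hmn⟩)
          · rcases List.mem_append.mp hmem with h1 | h1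
            · have := (Hchild (c:Int) (by positivity) (by exact_mod_cast (by omega : c ≤ 9)) hg m).mp (Or.inl h1)
              exact ⟨(c:Int), by positivity, by push_cast; omega, hg, this.1, this.2⟩
            · have hm' : m = 10*x + (c:Int) := by simpa using h1
              have := (Hchild (c:Int) (by positivity) (by exact_mod_cast (by omega : c ≤ 9)) hg m).mp (Or.inr hm')
              exact ⟨(c:Int), by positivity, by push_cast; omega, hg, this.1, this.2⟩
          · exact ⟨d, hd0, by push_cast; omega, hdn, hT, hmn⟩
        · rintro ⟨d, hd0, hdc, hdn, hT, hmn⟩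
          by_cases hdceq : d = (c:Int)
          · subst hdceq
            have := (Hchild (c:Int) hd0 (by omega) hdn m).mpr ⟨hT, hmn⟩
            rcases this with h1 | h1
            · exact Or.inl (List.mem_append.mpr (Or.inl h1))
            · exact Or.inl (List.mem_append.mpr (Or.inr (List.mem_singleton.mpr h1)))
          · right
            refine ⟨d, hd0, ?_, hdn, hT, hmn⟩
            push_cast at hdc ⊢
            omega
      · rw [if_neg (by rintro ⟨-, h⟩; exact hg h)]
        simp only [List.not_mem_nil, false_or]
        constructor
        · rintro ⟨d, hd0, hdc, hdn, hT, hmn⟩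
          exact ⟨d, hd0, by push_cast; omega, hdn, hT, hmn⟩
        · rintro ⟨d, hd0, hdc, hdn, hT, hmn⟩
          refine ⟨d, hd0, ?_, hdn, hT, hmn⟩
          by_cases hdceq : d = (c:Int)
          · subst hdceq; exact absurd hdn hg
          · push_cast at hdc ⊢; omega

-- ---- decimal strings ----

theorem pvTdcAcc : ∀ (fuel : Nat) (n : Nat) (ds : List Char),
    Nat.toDigitsCore 10 fuel n ds = Nat.toDigitsCore 10 fuel n [] ++ ds := by
  intro fuel
  induction fuel with
  | zero => intro n ds; simp [Nat.toDigitsCore]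
  | succ fuel ih =>
      intro n ds
      simp only [Nat.toDigitsCore]
      by_cases h : n / 10 = 0
      · simp [h]
      · rw [if_neg h, if_neg h, ih (n/10) (Nat.digitChar (n % 10) :: ds),
          ih (n/10) [Nat.digitChar (n % 10)]]
        simp

theorem pvTdcFuel : ∀ (f f' n : Nat), 0 < f → 0 < f' → n < 10^f → n < 10^f' →
    Nat.toDigitsCore 10 f n [] = Nat.toDigitsCore 10 f' n [] := by
  intro f
  induction f with
  | zero => omega
  | succ f ih =>
      intro f' n _ hf' hn hn'
      obtain ⟨f'', rfl⟩ : ∃ g, f' = g + 1 := ⟨f' - 1, by omega⟩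
      simp only [Nat.toDigitsCore]
      by_cases h : n / 10 = 0
      · simp [h]
      · rw [if_neg h, if_neg h, pvTdcAcc f (n/10) _, pvTdcAcc f'' (n/10) _]
        have hfpos : 0 < f := by
          by_contra hc
          have : f = 0 := by omega
          subst this
          simp at hn
          omega
        have hf''pos : 0 < f'' := by
          by_contra hc
          have : f'' = 0 := by omega
          subst this
          simp at hn'
          omega
        rw [ih f'' (n/10) hfpos hf''pos (by
            rw [Nat.div_lt_iff_lt_mul (by norm_num)]
            calc n < 10^(f+1) := hn
              _ = 10^f * 10 := by ring)
          (by
            rw [Nat.div_lt_iff_lt_mul (by norm_num)]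
            calc n < 10^(f''+1) := hn'
              _ = 10^f'' * 10 := by ring)]

theorem pvToDigitsAppend {m d : Nat} (hm : 1 ≤ m) (hd : d < 10) :
    Nat.toDigits 10 (10*m + d) = Nat.toDigits 10 m ++ [Nat.digitChar d] := by
  unfold Nat.toDigits
  have hdiv : (10*m + d) / 10 = m := by omega
  have hmod : (10*m + d) % 10 = d := by omega
  conv_lhs => rw [Nat.toDigitsCore]
  rw [if_neg (by omega), hdiv, hmod, pvTdcAcc]
  congr 1
  have h1 : m < 10^(10*m+d) := lt_of_lt_of_le (Nat.lt_pow_self (by norm_num))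
    (Nat.pow_le_pow_right (by norm_num) (by omega))
  have h2 : m < 10^(m+1) := lt_of_lt_of_le (Nat.lt_pow_self (by norm_num))
    (Nat.pow_le_pow_right (by norm_num) (by omega))
  exact pvTdcFuel _ _ m (by omega) (by omega) h1 h2

theorem pvToCharsStep {x c : Int} (hx : 1 ≤ x) (hc : 0 ≤ c) (hc9 : c ≤ 9) :
    PySem.Int.toChars (10*x + c) = PySem.Int.toChars x ++ [Nat.digitChar c.toNat] := by
  unfold PySem.Int.toChars
  rw [if_neg (by omega), if_neg (by omega)]
  have htn : (10*x + c).toNat = 10 * x.toNat + c.toNat := by omega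
  rw [htn, pvToDigitsAppend (by omega) (by omega)]

theorem pvToCharsDigit {d : Int} (h0 : 0 ≤ d) (h9 : d ≤ 9) :
    PySem.Int.toChars d = [Nat.digitChar d.toNat] := by
  interval_cases d <;> decide

theorem pvDigitCharMono {d d' : Nat} (h : d < d') (h9 : d' < 10) :
    Nat.digitChar d < Nat.digitChar d' := by
  interval_cases d' <;> interval_cases d <;> decide

-- toChars x is a prefix of toChars m for m in x's subtree
theorem pvPrefixAux : ∀ (k : Nat) (x m : Int), 1 ≤ x → x * 10^k ≤ m → m < (x+1) * 10^k →
    PySem.Int.toChars x <+: PySem.Int.toChars m := by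
  intro k
  induction k with
  | zero =>
      intro x m hx h1 h2
      simp only [pow_zero, mul_one] at h1 h2
      have : m = x := by omega
      subst this
      exact List.prefix_refl _
  | succ k ih =>
      intro x m hx h1 h2
      rcases pvT_split_k k h1 h2 with ⟨c, hc0, hc9, ha, hb⟩
      have hstep : PySem.Int.toChars (10*x + c) = PySem.Int.toChars x ++ [Nat.digitChar c.toNat] :=
        pvToCharsStep hx hc0 hc9
      have h1' : PySem.Int.toChars x <+: PySem.Int.toChars (10*x + c) := by
        rw [hstep]; exact List.prefix_append _ _
      exact h1'.trans (ih (10*x + c) m (by omega) ha hb)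

theorem pvPrefix {x m : Int} (hx : 1 ≤ x) (h : pvT x m) :
    PySem.Int.toChars x <+: PySem.Int.toChars m := by
  rcases h with ⟨k, h1, h2⟩
  exact pvPrefixAux k x m hx h1 h2

-- lexicographic string facts
theorem pvLexExt (s t : List Char) (h : t ≠ []) : List.Lex (· < ·) s (s ++ t) := by
  induction s with
  | nil => cases t with
    | nil => simp at h
    | cons a t' => exact List.Lex.nil
  | cons a s' ih => exact List.Lex.cons ih

theorem pvLexMid (s : List Char) (c c' : Char) (t u : List Char) (h : c < c') :
    List.Lex (· < ·) (s ++ c :: t) (s ++ c' :: u) := by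
  induction s with
  | nil => exact List.Lex.rel h
  | cons a s' ih => exact List.Lex.cons ih

theorem pvStrLtOfLex {s t : String} (h : List.Lex (· < ·) s.toList t.toList) : s < t := by
  rw [String.lt_iff_toList_lt]
  exact (List.lt_iff_lex_lt _ _).mpr h

-- cross-subtree comparisons
theorem pvLtOfSubtrees {x c c' a b : Int} (hx : 1 ≤ x) (hc0' : 0 ≤ c') (hcc : c' < c) (hc9 : c ≤ 9)
    (ha : pvT (10*x + c) a) (hb : pvT (10*x + c') b) :
    PySem.Int.toStr b < PySem.Int.toStr a := by
  rcases pvPrefix (by omega) ha with ⟨ra, hra⟩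
  rcases pvPrefix (by omega) hb with ⟨rb, hrb⟩
  rw [pvToCharsStep hx (by omega) hc9] at hra
  rw [pvToCharsStep hx hc0' (by omega)] at hrb
  apply pvStrLtOfLex
  rw [PySem.Int.toList_toStr, PySem.Int.toList_toStr, ← hra, ← hrb]
  simp only [List.append_assoc, List.singleton_append]
  exact pvLexMid _ _ _ _ _ (pvDigitCharMono (by omega) (by omega))

theorem pvLtParent {x a : Int} (hx : 1 ≤ x) (hT : pvT x a) (hne : a ≠ x) :
    PySem.Int.toStr x < PySem.Int.toStr a := by
  rcases pvT_split hx hT hne with ⟨c, hc0, hc9, hTc⟩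
  rcases pvPrefix (by omega) hTc with ⟨ra, hra⟩
  rw [pvToCharsStep hx hc0 hc9] at hra
  apply pvStrLtOfLex
  rw [PySem.Int.toList_toStr, PySem.Int.toList_toStr, ← hra]
  simp only [List.append_assoc, List.singleton_append]
  exact pvLexExt _ _ (by simp)

theorem pvLtOfDigits {d d' a b : Int} (hd' : 0 ≤ d') (hdd : d' < d) (hd9 : d ≤ 9)
    (ha : pvT d a) (hb : pvT d' b) (hd1 : 1 ≤ d) (hd1' : 1 ≤ d') :
    PySem.Int.toStr b < PySem.Int.toStr a := by
  rcases pvPrefix hd1 ha with ⟨ra, hra⟩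
  rcases pvPrefix hd1' hb with ⟨rb, hrb⟩
  rw [pvToCharsDigit (by omega) hd9] at hra
  rw [pvToCharsDigit hd' (by omega)] at hrb
  apply pvStrLtOfLex
  rw [PySem.Int.toList_toStr, PySem.Int.toList_toStr, ← hra, ← hrb]
  simp only [List.singleton_append]
  exact List.Lex.rel (pvDigitCharMono (by omega) (by omega))

theorem pvLtZero {d a : Int} (hd1 : 1 ≤ d) (hd9 : d ≤ 9) (ha : pvT d a) :
    PySem.Int.toStr 0 < PySem.Int.toStr a := by
  rcases pvPrefix hd1 ha with ⟨ra, hra⟩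
  rw [pvToCharsDigit (by omega) hd9] at hra
  apply pvStrLtOfLex
  rw [PySem.Int.toList_toStr, PySem.Int.toList_toStr, ← hra]
  simp only [List.singleton_append]
  have h0 : PySem.Int.toChars 0 = [Nat.digitChar 0] := by decide
  rw [h0]
  exact List.Lex.rel (pvDigitCharMono (by omega) (by omega))

-- ---- the traversal is strictly descending in toStr, and a permutation of range(0,n) ----

theorem pvPairwiseSub (n : Int) : ∀ (fuel : Nat) (x : Int), (n - x).toNat ≤ fuel → 1 ≤ x → x < n →
    (pvIdxC n x 10 ++ [x]).Pairwise (fun a b => PySem.Int.toStr b < PySem.Int.toStr a) := by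
  intro fuel
  induction fuel with
  | zero => intro x hf hx hxn; omega
  | succ fuel ih =>
      intro x hf hx hxn
      have hmemc : ∀ c : Nat, c ≤ 10 → ∀ a ∈ pvIdxC n x c,
          ∃ d : Int, 0 ≤ d ∧ d < (c:Int) ∧ pvT (10*x+d) a := by
        intro c hc a hamem
        rcases (pvMemC n x hx c hc a).mp hamem with ⟨d, hd0, hdc, _, hT, _⟩
        exact ⟨d, hd0, hdc, hT⟩
      have hloop : ∀ c : Nat, c ≤ 10 →
          (pvIdxC n x c).Pairwise (fun a b => PySem.Int.toStr b < PySem.Int.toStr a) := by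
        intro c
        induction c with
        | zero => intro _; simp [pvIdxC]
        | succ c ihc =>
            intro hc
            rw [show pvIdxC n x (c+1) =
              (if 1 ≤ x ∧ 10*x + (c:Int) < n then
                pvIdxC n (10*x + (c:Int)) 10 ++ [10*x + (c:Int)] else []) ++ pvIdxC n x c
              from by rw [pvIdxC]]
            rw [List.pairwise_append]
            refine ⟨?_, ihc (by omega), ?_⟩
            · by_cases hg : 10*x + (c:Int) < n
              · rw [if_pos ⟨hx, hg⟩]
                exact ih (10*x + (c:Int)) (by omega) (by omega) hg
              · rw [if_neg (by rintro ⟨-, h⟩; exact hg h)]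
                simp
            · intro a ha b hb
              by_cases hg : 10*x + (c:Int) < n
              · rw [if_pos ⟨hx, hg⟩] at ha
                have hTa : pvT (10*x + (c:Int)) a := by
                  rcases List.mem_append.mp ha with h1 | h1
                  · exact ((pvMemSub n (n - (10*x+(c:Int))).toNat _ le_rfl (by omega) hg a).mp
                      (Or.inl h1)).1
                  · have h2 : a = 10*x + (c:Int) := by simpa using h1
                    rw [h2]
                    exact pvT_self _
                rcases hmemc c (by omega) b hb with ⟨d, hd0, hdc, hTb⟩
                exact pvLtOfSubtrees hx hd0 (by omega) (by omega) hTa hTb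
              · rw [if_neg (by rintro ⟨-, h⟩; exact hg h)] at ha
                simp at ha
      rw [List.pairwise_append]
      refine ⟨hloop 10 le_rfl, by simp, ?_⟩
      intro a ha b hb
      have hb' : b = x := by simpa using hb
      rw [hb']
      rcases hmemc 10 le_rfl a ha with ⟨d, hd0, hd10, hTa⟩
      have hTxa : pvT x a := pvT_step hd0 (by omega) hTa
      have hane : a ≠ x := by
        have := pvT_le (by omega) hTa
        omega
      exact pvLtParent hx hTxa hane

theorem pvTopMem (n : Int) : ∀ d : Nat, d ≤ 9 → ∀ m,
    (m ∈ pvTopC n d ↔ ∃ e : Int, 1 ≤ e ∧ e ≤ (d:Int) ∧ e < n ∧ pvT e m ∧ m < n) := by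
  intro d
  induction d with
  | zero =>
      intro _ m
      simp only [pvTopC, List.not_mem_nil, false_iff]
      rintro ⟨e, he1, he0, -⟩
      simp only [Nat.cast_zero] at he0
      omega
  | succ d ihd =>
      intro hd m
      rw [show pvTopC n (d+1) =
        (if ((d:Int)+1) < n then pvIdxC n ((d:Int)+1) 10 ++ [(d:Int)+1] else []) ++ pvTopC n d
        from by rw [pvTopC]]
      rw [List.mem_append, ihd (by omega)]
      by_cases hg : ((d:Int)+1) < n
      · rw [if_pos hg]
        constructor
        · rintro (hmem | ⟨e, he1, hed, hen, hT, hmn⟩)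
          · rcases List.mem_append.mp hmem with h1 | h1
            · have h2 := (pvMemSub n (n - ((d:Int)+1)).toNat _ le_rfl (by omega) hg m).mp (Or.inl h1)
              exact ⟨(d:Int)+1, by omega, by push_cast; omega, hg, h2.1, h2.2⟩
            · have hm2 : m = (d:Int)+1 := by simpa using h1
              have h2 := (pvMemSub n (n - ((d:Int)+1)).toNat _ le_rfl (by omega) hg m).mp (Or.inr hm2)
              exact ⟨(d:Int)+1, by omega, by push_cast; omega, hg, h2.1, h2.2⟩
          · exact ⟨e, he1, by push_cast at hed ⊢; omega, hen, hT, hmn⟩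
        · rintro ⟨e, he1, hed, hen, hT, hmn⟩
          by_cases heq : e = (d:Int)+1
          · left
            have h2 := (pvMemSub n (n - ((d:Int)+1)).toNat ((d:Int)+1) le_rfl (by omega)
              (heq ▸ hen) m).mpr ⟨heq ▸ hT, hmn⟩
            rcases h2 with h1 | h1
            · exact List.mem_append.mpr (Or.inl h1)
            · exact List.mem_append.mpr (Or.inr (List.mem_singleton.mpr h1))
          · right
            refine ⟨e, he1, ?_, hen, hT, hmn⟩
            push_cast at hed ⊢
            omega
      · rw [if_neg hg]
        simp only [List.not_mem_nil, false_or]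
        constructor
        · rintro ⟨e, he1, hed, hen, hT, hmn⟩
          exact ⟨e, he1, by push_cast at hed ⊢; omega, hen, hT, hmn⟩
        · rintro ⟨e, he1, hed, hen, hT, hmn⟩
          refine ⟨e, he1, ?_, hen, hT, hmn⟩
          by_cases heq : e = (d:Int)+1
          · rw [heq] at hen
            exact absurd hen hg
          · push_cast at hed ⊢
            omega

theorem pvTopPairwise (n : Int) : ∀ d : Nat, d ≤ 9 →
    (pvTopC n d).Pairwise (fun a b => PySem.Int.toStr b < PySem.Int.toStr a) := by
  intro d
  induction d with
  | zero => intro _; simp [pvTopC]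
  | succ d ihd =>
      intro hd
      rw [show pvTopC n (d+1) =
        (if ((d:Int)+1) < n then pvIdxC n ((d:Int)+1) 10 ++ [(d:Int)+1] else []) ++ pvTopC n d
        from by rw [pvTopC]]
      rw [List.pairwise_append]
      refine ⟨?_, ihd (by omega), ?_⟩
      · by_cases hg : ((d:Int)+1) < n
        · rw [if_pos hg]
          exact pvPairwiseSub n (n - ((d:Int)+1)).toNat _ le_rfl (by omega) hg
        · rw [if_neg hg]
          simp
      · intro a ha b hb
        by_cases hg : ((d:Int)+1) < n
        · rw [if_pos hg] at ha
          have hTa : pvT ((d:Int)+1) a := by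
            rcases List.mem_append.mp ha with h1 | h1
            · exact ((pvMemSub n (n - ((d:Int)+1)).toNat _ le_rfl (by omega) hg a).mp (Or.inl h1)).1
            · have h2 : a = (d:Int)+1 := by simpa using h1
              rw [h2]
              exact pvT_self _
          rcases (pvTopMem n d (by omega) b).mp hb with ⟨e, he1, hed, -, hTb, -⟩
          exact pvLtOfDigits (by omega) (by omega) (by omega) hTa hTb (by omega) he1
        · rw [if_neg hg] at ha
          simp at ha

theorem pvKPairwise (n : Int) :
    (pvK n).Pairwise (fun a b => PySem.Int.toStr b < PySem.Int.toStr a) := by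
  unfold pvK
  rw [List.pairwise_append]
  refine ⟨pvTopPairwise n 9 le_rfl, by split <;> simp, ?_⟩
  intro a ha b hb
  have hb0 : b = 0 := by
    by_cases h0 : 0 < n
    · rw [if_pos h0] at hb
      simpa using hb
    · rw [if_neg h0] at hb
      simp at hb
  subst hb0
  rcases (pvTopMem n 9 le_rfl a).mp ha with ⟨e, he1, he9, -, hTa, -⟩
  exact pvLtZero he1 he9 hTa

theorem pvKNodup (n : Int) : (pvK n).Nodup := by
  refine (pvKPairwise n).imp ?_
  intro a b h
  intro e
  rw [e] at h
  exact lt_irrefl _ h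

theorem pvKMem (n : Int) (m : Int) : m ∈ pvK n ↔ 0 ≤ m ∧ m < n := by
  unfold pvK
  rw [List.mem_append, pvTopMem n 9 le_rfl]
  constructor
  · rintro (⟨e, he1, he9, hen, hT, hmn⟩ | hmem)
    · have := pvT_le he1 hT
      exact ⟨by omega, hmn⟩
    · by_cases h0 : 0 < n
      · rw [if_pos h0] at hmem
        have : m = 0 := by simpa using hmem
        omega
      · rw [if_neg h0] at hmem
        simp at hmem
  · rintro ⟨hm0, hmn⟩
    by_cases hm : 1 ≤ m
    · rcases pvT_leading hm with ⟨dd, hd1, hd9, hT⟩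
      exact Or.inl ⟨dd, hd1, hd9, lt_of_le_of_lt (pvT_le hd1 hT) hmn, hT, hmn⟩
    · right
      rw [if_pos (by omega)]
      simp
      omega

theorem pvKPerm (n : Int) : (pvK n).Perm (PySem.List.pyRange 0 n 1) := by
  rw [List.perm_ext_iff_of_nodup (pvKNodup n) (PySem.List.nodup_pyRange_one 0 n)]
  intro a
  rw [pvKMem, PySem.List.mem_pyRange_one]

-- A's sorted expanded multiset IS the blocks expanded in traversal order
theorem pvSorted (food : List Int) :
    PySem.List.sorted (((PySem.List.pyRange 0 (food.length : Int) 1)).flatMap (pvBlock food))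
      (fun x => x) true =
    (pvK (food.length : Int)).flatMap (pvBlock food) := by
  set R := PySem.List.pyRange 0 (food.length : Int) 1 with hR
  set L := R.flatMap (pvBlock food) with hL
  set K := pvK (food.length : Int) with hK
  have hperm : (PySem.List.sorted L (fun x => x) true).Perm (K.flatMap (pvBlock food)) := by
    refine (PySem.List.sorted_perm L (fun x => x) true).trans ?_
    exact List.Perm.flatMap ((pvKPerm _).symm) (fun a _ => List.Perm.refl _)
  have h1 : (PySem.List.sorted L (fun x => x) true).Pairwise (fun a b : String => b ≤ a) :=
    PySem.List.sorted_pairwise_rev L (fun x => x)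
  have h2 : (K.flatMap (pvBlock food)).Pairwise (fun a b : String => b ≤ a) :=
    pvFlatMapPairwise food K ((pvKPairwise _).imp (fun h => le_of_lt h))
  have := PySem.List.eq_of_perm_of_pairwise_le_of_injective (fun x : String => x)
    (fun _ _ h => h)
    (List.reverse_perm _ |>.trans (hperm.trans (List.reverse_perm _).symm))
    (List.pairwise_reverse.mpr h1) (List.pairwise_reverse.mpr h2)
  exact List.reverse_injective this

-- ---- B's dfs computes the traversal ----

theorem pvDfsBSpec (food : List Int) (n : Int) :
    ∀ (fuel : Nat) (x : Int) (out : List String), (n - x).toNat ≤ fuel → 1 ≤ x → x < n →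
    pvDfsB food n fuel x out = out ++ (pvIdxC n x 10 ++ [x]).map (pvPiece food) := by
  intro fuel
  induction fuel with
  | zero => intro x out hf hx hxn; omega
  | succ fuel ih =>
      intro x out hf hx hxn
      have hloop : ∀ c : Nat, c ≤ 10 → ∀ out1 : List String,
          (PySem.List.pyRange ((c:Int)-1) (-1) (-1)).foldl
            (fun out2 c' => if 10*x + c' < n then pvDfsB food n fuel (10*x + c') out2 else out2) out1
          = out1 ++ (pvIdxC n x c).map (pvPiece food) := by
        intro c
        induction c with
        | zero =>
            intro _ out1
            rw [show ((0:Nat):Int) - 1 = -1 from by norm_num,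
              PySem.List.pyRange_neg_one_eq_nil le_rfl]
            simp [pvIdxC]
        | succ c ihc =>
            intro hc out1
            have hcast : ((c+1 : Nat) : Int) - 1 = (c : Int) := by push_cast; ring
            rw [hcast, PySem.List.pyRange_neg_one_cons (by omega)]
            simp only [List.foldl_cons]
            rw [show pvIdxC n x (c+1) =
              (if 1 ≤ x ∧ 10*x + (c:Int) < n then
                pvIdxC n (10*x + (c:Int)) 10 ++ [10*x + (c:Int)] else []) ++ pvIdxC n x c
              from by rw [pvIdxC]]
            by_cases hg : 10*x + (c:Int) < n
            · rw [if_pos hg, if_pos ⟨hx, hg⟩,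
                ih (10*x + (c:Int)) out1 (by omega) (by omega) hg, ihc (by omega)]
              simp [List.map_append]
            · rw [if_neg hg, if_neg (by rintro ⟨-, h⟩; exact hg h), ihc (by omega),
                List.nil_append]
      rw [show pvDfsB food n (fuel+1) x out =
        ((PySem.List.pyRange 9 (-1) (-1)).foldl
          (fun out2 c => if 10*x + c < n then pvDfsB food n fuel (10*x + c) out2 else out2) out)
        ++ [pyStrMul (PySem.Int.toStr x) (PySem.Int.floordiv (PySem.List.pyGetD food x 0) 2)]
        from by rw [pvDfsB]]
      rw [show (9:Int) = ((10:Nat):Int) - 1 from by norm_num, hloop 10 le_rfl out,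
        List.map_append, List.append_assoc]
      simp [pvPiece]

theorem pvTopLoop (food : List Int) (n : Int) (out : List String) :
    (PySem.List.pyRange 9 0 (-1)).foldl
      (fun out1 d => if d < n then pvDfsB food n n.toNat d out1 else out1) out
    = out ++ (pvTopC n 9).map (pvPiece food) := by
  have hloop : ∀ d : Nat, d ≤ 9 → ∀ out1 : List String,
      (PySem.List.pyRange ((d:Nat):Int) 0 (-1)).foldl
        (fun out2 d' => if d' < n then pvDfsB food n n.toNat d' out2 else out2) out1
      = out1 ++ (pvTopC n d).map (pvPiece food) := by
    intro d
    induction d with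
    | zero =>
        intro _ out1
        rw [show (((0:Nat)):Int) = 0 from by norm_num, PySem.List.pyRange_neg_one_eq_nil le_rfl]
        simp [pvTopC]
    | succ d ihd =>
        intro hd out1
        rw [show ((d+1:Nat):Int) = (d:Int)+1 from by push_cast; ring,
          PySem.List.pyRange_neg_one_cons (by omega)]
        simp only [List.foldl_cons]
        rw [show (d:Int)+1-1 = ((d:Nat):Int) from by push_cast; ring]
        rw [show pvTopC n (d+1) =
          (if ((d:Int)+1) < n then pvIdxC n ((d:Int)+1) 10 ++ [(d:Int)+1] else []) ++ pvTopC n d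
          from by rw [pvTopC]]
        by_cases hg : (d:Int)+1 < n
        · rw [if_pos hg, if_pos hg,
            pvDfsBSpec food n n.toNat ((d:Int)+1) out1 (by omega) (by omega) hg,
            ihd (by omega)]
          simp [List.map_append]
        · rw [if_neg hg, if_neg hg, ihd (by omega), List.nil_append]
  rw [show (9:Int) = ((9:Nat):Int) from by norm_num, hloop 9 le_rfl out]

-- joining with "" concatenates
theorem pvStrExt {s t : String} (h : s.toList = t.toList) : s = t := by
  rw [← String.ofList_toList (s := s), ← String.ofList_toList (s := t), h]

theorem pvJoinCons (s : String) (rest : List String) :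
    PySem.Str.join "" (s :: rest) = s ++ PySem.Str.join "" rest := by
  apply pvStrExt
  rw [String.toList_append, PySem.Str.toList_join, PySem.Str.toList_join, String.toList_empty,
    pvJoinNil, pvJoinNil, List.map_cons, List.flatten_cons]

-- ===== VERDICT (by name: the statement is the Claim_ definition above) =====
theorem solution_spec : Claim_equal_solution := by
  intro food _
  unfold Spec_solution
  by_cases hf : food = []
  · subst hf; decide
  · have hn : 0 < (food.length : Int) := by
      cases food with
      | nil => exact absurd rfl hf
      | cons a t => simp only [List.length_cons]; omega
    simp only [solution, solution_alt]
    rw [pvAList food _ [], List.nil_append, pvSorted, pvTopLoop, if_pos hn]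
    rw [show (fun i => pyStrMul (PySem.Int.toStr i) (PySem.Int.floordiv (PySem.List.pyGetD food i 0) 2)) = pvPiece food from rfl,
        show [pyStrMul (PySem.Int.toStr 0) (PySem.Int.floordiv (PySem.List.pyGetD food 0 0) 2)] = List.map (pvPiece food) [0] from rfl,
        pvJoinBlocks food _, pvJoinBlocks food _,
        show pvK (food.length:Int) = pvTopC (food.length:Int) 9 ++ [0] from by unfold pvK; rw [if_pos hn],
        List.map_append]
    rw [show ([PySem.Str.join "" (List.map (pvPiece food) (PySem.List.pyRange 0 (food.length:Int) 1)), "0"] ++ List.map (pvPiece food) (pvTopC (food.length:Int) 9) ++ List.map (pvPiece food) [0] : List String) = PySem.Str.join "" (List.map (pvPiece food) (PySem.List.pyRange 0 (food.length:Int) 1)) :: "0" :: (List.map (pvPiece food) (pvTopC (food.length:Int) 9) ++ List.map (pvPiece food) [0]) from by simp]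
    rw [pvJoinCons, pvJoinCons, String.append_assoc]
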